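-- pv_equiv track=rewrite | github.com/NeolexDev/CodingAccelerator-EpreuvesAir | air01.py | split
-- ===== SOURCE A (Python) =====
-- def count_split(line , sep_string):
--   count = 0
--   total = 1
--   for c in line:
--     if c == sep_string[count]:
--       count += 1
--     else:
--       count = 0
--     if count == len(sep_string):
--       total+=1
--       count=0
--
--   return total
--
-- def split(line , sep_string):
--   array = ["" for i in range(count_split(line , sep_string))]
--   index = 0
--   count = 0
--   for c in line:
--     if c == sep_string[count]:
--       count+=1
--     else:
--       count = 0
--     if count == 0:
--       array[index] += c
--     if len(sep_string) == count:
--       count = 0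
--       index+=1
--   return array
-- ===== SOURCE B (Python) =====
-- def split(line, sep_string):
--   array = [""]
--   count = 0
--   for c in line:
--     if c == sep_string[count]:
--       count += 1
--     else:
--       count = 0
--     if count == 0:
--       array[-1] += c
--     if len(sep_string) == count:
--       count = 0
--       array.append("")
--   return array
-- ===== Notes on version B (the rewrite author's own statement) =====
-- stated objective: simpler
-- what changed: Dropped the count_split pre-counting helper: instead of a first full pass to presize the result array and a second pass to fill it, B makes a single pass that grows the list incrementally (append on each completed separator, extend the last segment otherwise).
import Mathlib
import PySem

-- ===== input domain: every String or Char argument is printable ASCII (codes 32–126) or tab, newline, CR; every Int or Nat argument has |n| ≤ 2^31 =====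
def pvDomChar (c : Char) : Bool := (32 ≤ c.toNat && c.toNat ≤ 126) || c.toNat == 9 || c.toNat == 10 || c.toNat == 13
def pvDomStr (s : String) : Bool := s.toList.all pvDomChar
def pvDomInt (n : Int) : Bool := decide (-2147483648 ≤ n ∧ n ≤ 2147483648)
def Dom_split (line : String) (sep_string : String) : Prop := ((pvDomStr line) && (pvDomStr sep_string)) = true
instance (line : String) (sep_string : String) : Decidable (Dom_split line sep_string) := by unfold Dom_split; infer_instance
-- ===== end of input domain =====

-- B drops A's count_split pre-counting pass: one pass growing the result list instead of
-- A's two passes (count segments, presize, then fill). Equivalence of return values proved.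

-- ===== PORT A =====
-- helper count_split: first pass, counts how many segments the result will have
-- loop body of count_split's for-loop
def countStep (sepL : List Char) (st : Nat × Nat) (c : Char) : Nat × Nat :=
  let count := if sepL[st.1]? = some c then st.1 + 1 else 0
  if count = sepL.length then (0, st.2 + 1) else (count, st.2)

def count_split (line : String) (sep_string : String) : Nat :=
  (line.toList.foldl (countStep sep_string.toList) (0, 1)).2

-- loop body of split's for-loop (array[index] += c  ↦  List.modify)
def stepA (sepL : List Char) (st : List String × Nat × Nat) (c : Char) :
    List String × Nat × Nat :=
  let (array, index, count) := st
  let count := if sepL[count]? = some c then count + 1 else 0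
  let array := if count = 0 then array.modify index (·.push c) else array
  if sepL.length = count then (array, index + 1, 0) else (array, index, count)

-- second pass: fill the presized array
def split (line : String) (sep_string : String) : List String :=
  (line.toList.foldl (stepA sep_string.toList)
    (List.replicate (count_split line sep_string) "", 0, 0)).1

-- ===== PORT B =====
-- loop body of B's single pass: array[-1] += c on a non-match, append "" on a completed separator
def stepB (sepL : List Char) (st : List String × Nat) (c : Char) : List String × Nat :=
  let (array, count) := st
  let count := if sepL[count]? = some c then count + 1 else 0
  let array := if count = 0 then array.modify (array.length - 1) (·.push c) else array
  if sepL.length = count then (array ++ [""], 0) else (array, count)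

def split_alt (line : String) (sep_string : String) : List String :=
  (line.toList.foldl (stepB sep_string.toList) ([""], 0)).1

-- ===== PRECONDITION & SPEC =====
-- Pre_ excludes only the inputs on which Python A raises IndexError: a nonempty line with an
-- empty separator (sep_string[count] is out of range); B's Python raises there as well.
def Pre_split (line : String) (sep_string : String) : Prop :=
  line = "" ∨ sep_string ≠ ""
instance (line : String) (sep_string : String) : Decidable (Pre_split line sep_string) := by
  unfold Pre_split; infer_instance
def pvWitness_split : String × String := ("ab,cd,", ",")

def Spec_split (line : String) (sep_string : String) (out : List String) : Prop := out = split_alt line sep_string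
instance (line : String) (sep_string : String) (out : List String) : Decidable (Spec_split line sep_string out) := by unfold Spec_split; infer_instance

-- ===== CLAIM (what is proved, stated in full; the proofs are below) =====
def Claim_equal_split : Prop := ∀ (line : String) (sep_string : String), Dom_split line sep_string → Pre_split line sep_string → Spec_split line sep_string (split line sep_string)

-- ===== LEMMAS AND PROOFS =====

-- number of separator completions while scanning `chars` starting with partial-match state `count`
def numSeps (sepL : List Char) : List Char → Nat → Nat
  | [], _ => 0
  | c :: rest, count =>
    let count' := if sepL[count]? = some c then count + 1 else 0
    if count' = sepL.length then numSeps sepL rest 0 + 1 else numSeps sepL rest count'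

theorem countFold_eq (sepL : List Char) (chars : List Char) :
    ∀ count total,
    (chars.foldl (countStep sepL) (count, total)).2 = total + numSeps sepL chars count := by
  induction chars with
  | nil => intro count total; simp [numSeps]
  | cons c rest ih =>
    intro count total
    simp only [List.foldl_cons, countStep, numSeps]
    by_cases h : (if sepL[count]? = some c then count + 1 else 0) = sepL.length
    · rw [if_pos h, if_pos h, ih]; omega
    · rw [if_neg h, if_neg h, ih]

theorem modify_append_left {α : Type} (l₁ l₂ : List α) (i : Nat) (f : α → α) (h : i < l₁.length) :
    (l₁ ++ l₂).modify i f = l₁.modify i f ++ l₂ := by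
  induction l₁ generalizing i with
  | nil => simp at h
  | cons a t ih =>
    cases i with
    | zero => simp [List.modify]
    | succ j =>
      simp only [List.cons_append, List.modify_succ_cons]
      rw [ih]
      simpa using Nat.lt_of_succ_lt_succ h

theorem main_fold (sepL : List Char) (chars : List Char) :
    ∀ (count : Nat) (arrB : List String), arrB ≠ [] →
    (chars.foldl (stepA sepL)
      (arrB ++ List.replicate (numSeps sepL chars count) "", arrB.length - 1, count)).1
    = (chars.foldl (stepB sepL) (arrB, count)).1 := by
  induction chars with
  | nil => intro count arrB _; simp [numSeps]
  | cons c rest ih =>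
    intro count arrB hne
    have hlen : 0 < arrB.length := List.length_pos_iff.mpr hne
    simp only [List.foldl_cons, stepA, stepB]
    by_cases hdone : (if sepL[count]? = some c then count + 1 else 0) = sepL.length
    · -- separator completes here
      have hnum : numSeps sepL (c :: rest) count = numSeps sepL rest 0 + 1 := by
        simp [numSeps, hdone]
      rw [hnum, if_pos hdone.symm, if_pos hdone.symm]
      by_cases hz : (if sepL[count]? = some c then count + 1 else 0) = 0
      · -- (only when sepL = []): write the char, then advance the segment
        rw [if_pos hz, if_pos hz,
          modify_append_left _ _ _ _ (by omega)]
        have harr : (arrB.modify (arrB.length - 1) (·.push c))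
            ++ List.replicate (numSeps sepL rest 0 + 1) ""
            = ((arrB.modify (arrB.length - 1) (·.push c)) ++ [""])
              ++ List.replicate (numSeps sepL rest 0) "" := by
          simp [List.replicate_succ]
        have hlen2 : arrB.length - 1 + 1
            = ((arrB.modify (arrB.length - 1) (·.push c)) ++ [""]).length - 1 := by
          simp; omega
        rw [harr, hlen2]
        exact ih 0 _ (by simp)
      · -- no write, advance the segment
        rw [if_neg hz, if_neg hz]
        have harr : arrB ++ List.replicate (numSeps sepL rest 0 + 1) ""
            = (arrB ++ [""]) ++ List.replicate (numSeps sepL rest 0) "" := by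
          simp [List.replicate_succ]
        have hlen2 : arrB.length - 1 + 1 = (arrB ++ [""]).length - 1 := by simp; omega
        rw [harr, hlen2]
        exact ih 0 _ (by simp)
    · -- separator not completed
      have hdone' : ¬ sepL.length = (if sepL[count]? = some c then count + 1 else 0) :=
        fun h => hdone h.symm
      have hnum : numSeps sepL (c :: rest) count
          = numSeps sepL rest (if sepL[count]? = some c then count + 1 else 0) := by
        simp only [numSeps, if_neg hdone]
      rw [hnum, if_neg hdone', if_neg hdone']
      by_cases hz : (if sepL[count]? = some c then count + 1 else 0) = 0
      · rw [if_pos hz, if_pos hz,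
          modify_append_left _ _ _ _ (by omega)]
        have := ih (if sepL[count]? = some c then count + 1 else 0)
          (arrB.modify (arrB.length - 1) (·.push c))
          (by rw [← List.length_pos_iff, List.length_modify]; omega)
        rw [List.length_modify] at this
        exact this
      · rw [if_neg hz, if_neg hz]
        exact ih _ _ hne

-- ===== VERDICT (by name: the statement is the Claim_ definition above) =====
theorem split_spec : Claim_equal_split := by
  intro line sep_string _ _
  unfold Spec_split split split_alt
  have hcs : count_split line sep_string = 1 + numSeps sep_string.toList line.toList 0 := by
    unfold count_split
    exact countFold_eq _ _ 0 1
  have hrep : List.replicate (count_split line sep_string) ""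
      = [""] ++ List.replicate (numSeps sep_string.toList line.toList 0) "" := by
    rw [hcs, Nat.add_comm, List.replicate_succ]
    rfl
  rw [hrep]
  have := main_fold sep_string.toList line.toList 0 [""] (by simp)
  simpa using this
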